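-- pv_equiv track=rewrite | github.com/AVUKU-PRAGATHESWARI/GeeksForGeeks | TriangleShrinkingDownwards.py | triDownwards
-- ===== SOURCE A (Python) =====
-- def triDownwards(S):
--     res=[]
--     for i in range(len(S)-1):
--         dot="."*i
--         res.append(dot+S[i:]+"\n")
--     dot="."*(len(S)-1)
--     res.append(dot+S[-1])
--     return res
-- ===== SOURCE B (Python) =====
-- def triDownwards(S):
--     # incremental: keep one char buffer, dot out one more leading char per row
--     chars = list(S)
--     out = []
--     for i in range(len(S) - 1):
--         out.append(''.join(chars) + "\n")
--         chars[i] = "."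
--     out.append(''.join(chars))
--     return out
-- ===== Notes on version B (the rewrite author's own statement) =====
-- stated objective: alternative
-- what changed: B maintains a single mutable character buffer, emitting each row from the buffer and then dotting out one more leading character in place, instead of recomputing each row from scratch as i leading dots plus the suffix S[i:].
import Mathlib
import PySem

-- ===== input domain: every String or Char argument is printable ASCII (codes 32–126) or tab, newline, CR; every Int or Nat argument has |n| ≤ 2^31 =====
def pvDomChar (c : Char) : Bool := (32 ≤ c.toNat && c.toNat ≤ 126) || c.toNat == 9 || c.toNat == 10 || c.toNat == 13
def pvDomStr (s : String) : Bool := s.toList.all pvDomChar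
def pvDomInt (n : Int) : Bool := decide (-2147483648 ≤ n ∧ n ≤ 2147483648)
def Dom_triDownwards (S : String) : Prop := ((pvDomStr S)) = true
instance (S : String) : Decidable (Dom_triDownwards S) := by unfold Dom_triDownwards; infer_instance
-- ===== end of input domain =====

-- B: one mutable character buffer, each row emitted then one more leading char dotted in place,
-- instead of recomputing "."*i + S[i:] per row (alternative decomposition, same cost).

-- ===== PORT A =====
-- res=[]; for i in range(len(S)-1): res.append("."*i + S[i:] + "\n"); res.append("."*(len(S)-1) + S[-1])
def triDownwards (S : String) : List String :=
  ((PySem.List.pyRange 0 (PySem.Str.len S - 1) 1).foldl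
    (fun res i =>
      res ++ [String.ofList (List.replicate i.toNat '.'           -- "."*i  (i ≥ 0 here)
                ++ PySem.List.slice S.toList (some i) none        -- S[i:]
                ++ ['\n'])]) [])
  ++ (match PySem.List.pyGet? S.toList (-1) with                  -- S[-1]; none = IndexError, excluded by Pre_
      | some c => [String.ofList (List.replicate (PySem.Str.len S - 1).toNat '.' ++ [c])]
      | none => [])

-- ===== PORT B =====
-- chars=list(S); out=[]; for i in range(len(S)-1): out.append(''.join(chars)+"\n"); chars[i]="."; out.append(''.join(chars))
def triDownwards_alt (S : String) : List String :=
  (fun (st : List Char × List String) => st.2 ++ [String.ofList st.1])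
    ((PySem.List.pyRange 0 (PySem.Str.len S - 1) 1).foldl
      (fun (st : List Char × List String) i =>
        (PySem.List.pySetD st.1 i '.', st.2 ++ [String.ofList (st.1 ++ ['\n'])]))
      (S.toList, []))

-- ===== PRECONDITION & SPEC =====
-- Pre_ excludes only the empty string, on which A raises IndexError (S[-1]).
def Pre_triDownwards (S : String) : Prop := S ≠ ""
instance (S : String) : Decidable (Pre_triDownwards S) := by unfold Pre_triDownwards; infer_instance
def pvWitness_triDownwards : String := "abc"

def Spec_triDownwards (S : String) (out : List String) : Prop := out = triDownwards_alt S
instance (S : String) (out : List String) : Decidable (Spec_triDownwards S out) := by unfold Spec_triDownwards; infer_instance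

-- ===== CLAIM (what is proved, stated in full; the proofs are below) =====
def Claim_equal_triDownwards : Prop := ∀ (S : String), Dom_triDownwards S → Pre_triDownwards S → Spec_triDownwards S (triDownwards S)

-- ===== LEMMAS AND PROOFS =====

-- the row A builds for index j
def pvRowA (cs : List Char) (j : Nat) : String :=
  String.ofList (List.replicate j '.' ++ cs.drop j ++ ['\n'])

-- A's loop over range(k) produces exactly the mapped rows
lemma pv_loopA (cs : List Char) (k : Nat) :
    (PySem.List.pyRange 0 (k : Int) 1).foldl
      (fun res i =>
        res ++ [String.ofList (List.replicate i.toNat '.'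
                  ++ PySem.List.slice cs (some i) none ++ ['\n'])])
      ([] : List String)
    = (List.range k).map (pvRowA cs) := by
  induction k with
  | zero => rw [PySem.List.pyRange_one_eq_nil (by omega)]; simp
  | succ k ih =>
    have hcast : ((k + 1 : Nat) : Int) = (k : Int) + 1 := by push_cast; ring
    rw [hcast, PySem.List.pyRange_one_succ_right (by omega), List.foldl_append, ih,
      List.range_succ, List.map_append]
    simp [pvRowA, PySem.List.slice_from_natCast]

-- after k iterations B's buffer is k dots followed by the tail, and its output is A's first k rows
lemma pv_loop (cs : List Char) (k : Nat) (hk : k ≤ cs.length) :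
    (PySem.List.pyRange 0 (k : Int) 1).foldl
      (fun (st : List Char × List String) i =>
        (PySem.List.pySetD st.1 i '.', st.2 ++ [String.ofList (st.1 ++ ['\n'])]))
      (cs, [])
    = (List.replicate k '.' ++ cs.drop k, (List.range k).map (pvRowA cs)) := by
  induction k with
  | zero => rw [PySem.List.pyRange_one_eq_nil (by omega)]; simp
  | succ k ih =>
    have hk' : k ≤ cs.length := Nat.le_of_succ_le hk
    have hcast : ((k + 1 : Nat) : Int) = (k : Int) + 1 := by push_cast; ring
    rw [hcast, PySem.List.pyRange_one_succ_right (by omega), List.foldl_append, ih hk',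
      List.range_succ, List.map_append]
    simp only [List.foldl_cons, List.foldl_nil, Prod.mk.injEq]
    constructor
    · -- buffer: setting index k dots the head of (cs.drop k)
      rw [PySem.List.pySetD_natCast]
      have hdrop : cs.drop k = cs[k] :: cs.drop (k + 1) :=
        List.drop_eq_getElem_cons (by omega)
      rw [hdrop, List.set_append_right _ _ (by simp)]
      simp only [List.length_replicate, Nat.sub_self, List.set_cons_zero]
      rw [List.replicate_succ']
      simp
    · -- output: row k is k dots ++ cs.drop k ++ newline
      simp [pvRowA]

-- ===== VERDICT (by name: the statement is the Claim_ definition above) =====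
theorem triDownwards_spec : Claim_equal_triDownwards := by
  intro S _ hpre
  have hcs : S.toList ≠ [] := by
    simp only [ne_eq, String.toList_eq_nil_iff]; exact hpre
  have hn : 1 ≤ S.toList.length := List.length_pos_of_ne_nil hcs
  unfold Spec_triDownwards triDownwards triDownwards_alt
  have hlen : PySem.Str.len S - 1 = ((S.toList.length - 1 : Nat) : Int) := by
    simp only [PySem.Str.len_eq]; omega
  rw [hlen, pv_loopA S.toList (S.toList.length - 1),
    pv_loop S.toList (S.toList.length - 1) (by omega),
    PySem.List.pyGet?_neg_one, List.getLast?_eq_some_getLast hcs]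
  have htail : S.toList.drop (S.length - 1) = [S.toList.getLast hcs] := by
    rw [← String.length_toList]
    exact List.drop_length_sub_one hcs
  simp [htail]
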